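-- pv_equiv track=rewrite | github.com/g-loddi/DiffWave3D1D | residual_blocks.py | compute_receptive_field
-- ===== SOURCE A (Python) =====
-- def compute_receptive_field(residual_layers, dilation_cycle_length):
--     """
--     Compute the receptive field for a given number of layers and dilation cycle length.
--
--     Args:
--         residual_layers: Number of residual layers
--         dilation_cycle_length: Length of the dilation cycle
--
--     Returns:
--         Dictionary containing receptive fields for each dimension (temporal, height, width)
--     """
--     # Initialize receptive field for each dimension
--     rf_temporal = 1  # Temporal dimension
--     rf_height = 1    # Height dimension
--     rf_width = 1     # Width dimension
--
--     # Compute receptive field for each layer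
--     for i in range(residual_layers):
--         dilation = 2 ** (i % dilation_cycle_length)
--
--         # For temporal dimension (affected by all convolutions)
--         rf_temporal += 2 * (3 - 1) * dilation
--
--         # For spatial dimensions (only affected by 3D convolutions)
--         rf_height += 2 * (3 - 1)  # No dilation in spatial dimensions
--         rf_width += 2 * (3 - 1)   # No dilation in spatial dimensions
--
--     return {
--         'temporal': rf_temporal,
--         'height': rf_height,
--         'width': rf_width
--     }
-- ===== SOURCE B (Python) =====
-- def compute_receptive_field(residual_layers, dilation_cycle_length):
--     """Closed-form receptive field: spatial = 1 + 4n; temporal sums the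
--     dilation cycle as a geometric series (powers of two as bit shifts)
--     instead of looping over layers."""
--     n = residual_layers if residual_layers > 0 else 0
--     if n == 0:
--         temporal = 1
--     else:
--         full_cycles, rest = divmod(n, dilation_cycle_length)
--         total = (1 << rest) - 1
--         if full_cycles:
--             total += full_cycles * ((1 << dilation_cycle_length) - 1)
--         temporal = 1 + 4 * total
--     return {'temporal': temporal, 'height': 1 + 4 * n, 'width': 1 + 4 * n}
-- ===== Notes on version B (the rewrite author's own statement) =====
-- stated objective: faster
-- what changed: Replaces the per-layer loop with a closed form: spatial = 1 + 4*n and temporal via the geometric-series sum of one full dilation cycle (full_cycles*(2^L - 1) + (2^rest - 1), powers of two as bit shifts) obtained from divmod(n, L).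
-- outside the precondition, e.g. on compute_receptive_field(2, -2): A returns {'temporal': 7.0, 'height': 9, 'width': 9}, B raises ValueError; on compute_receptive_field(2, -1): A returns {'temporal': 9, 'height': 9, 'width': 9}, B raises ValueError; on compute_receptive_field(3, 0): A raises ZeroDivisionError, B raises ZeroDivisionError
import Mathlib
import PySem

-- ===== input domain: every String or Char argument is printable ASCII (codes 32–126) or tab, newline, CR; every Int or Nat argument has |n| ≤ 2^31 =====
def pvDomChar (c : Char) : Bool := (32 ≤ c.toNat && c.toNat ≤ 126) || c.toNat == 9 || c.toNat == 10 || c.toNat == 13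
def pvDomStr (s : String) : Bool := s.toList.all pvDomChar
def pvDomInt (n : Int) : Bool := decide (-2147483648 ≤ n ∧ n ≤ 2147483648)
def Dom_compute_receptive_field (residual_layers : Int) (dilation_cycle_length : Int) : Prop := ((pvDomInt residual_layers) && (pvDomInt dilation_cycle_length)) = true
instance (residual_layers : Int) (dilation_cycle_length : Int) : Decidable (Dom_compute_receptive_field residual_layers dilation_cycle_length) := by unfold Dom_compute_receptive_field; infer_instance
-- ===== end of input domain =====

-- B replaces A's per-layer loop by a closed form (geometric series over the dilation cycle); measured asymptotically faster.


-- ===== PORT A =====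
-- Literal port of A's per-layer loop; '2 ** (i % L)' is ported as 2 ^ (mod i L).toNat,
-- exact whenever i % L ≥ 0, i.e. on all of Pre_ (L ≥ 1).
def compute_receptive_field (residual_layers : Int) (dilation_cycle_length : Int) : List (String × Int) :=
  let st := (PySem.List.pyRange 0 residual_layers 1).foldl
    (fun (st : Int × Int × Int) i =>
      let dilation : Int := 2 ^ (PySem.Int.mod i dilation_cycle_length).toNat
      (st.1 + 2 * (3 - 1) * dilation, st.2.1 + 2 * (3 - 1), st.2.2 + 2 * (3 - 1)))
    (1, 1, 1)
  [("temporal", st.1), ("height", st.2.1), ("width", st.2.2)]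

-- ===== PORT B =====
-- Literal port of Source B's closed form; '1 << e' ported as 2 ^ e.toNat, exact on Pre_
-- (dilation_cycle_length ≥ 1, hence rest ≥ 0; Python raises ValueError on e < 0).
def compute_receptive_field_alt (residual_layers : Int) (dilation_cycle_length : Int) : List (String × Int) :=
  let n := if residual_layers > 0 then residual_layers else 0
  let temporal : Int :=
    if n = 0 then 1
    else
      let full_cycles := PySem.Int.floordiv n dilation_cycle_length
      let rest := PySem.Int.mod n dilation_cycle_length
      let total : Int := (2 ^ rest.toNat - 1) +
        (if full_cycles = 0 then 0 else full_cycles * (2 ^ dilation_cycle_length.toNat - 1))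
      1 + 4 * total
  [("temporal", temporal), ("height", 1 + 4 * n), ("width", 1 + 4 * n)]

-- ===== PRECONDITION & SPEC =====
-- Pre_ excludes positive residual_layers with dilation_cycle_length ≤ 0: there A raises
-- ZeroDivisionError (L = 0) or computes float dilations 2**negative, leaking a non-int
-- 'temporal' except in degenerate cases where every negative modulus happens to be 0.
def Pre_compute_receptive_field (residual_layers : Int) (dilation_cycle_length : Int) : Prop :=
  residual_layers ≤ 0 ∨ 1 ≤ dilation_cycle_length
instance (residual_layers : Int) (dilation_cycle_length : Int) : Decidable (Pre_compute_receptive_field residual_layers dilation_cycle_length) := by unfold Pre_compute_receptive_field; infer_instance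
def pvWitness_compute_receptive_field : Int × Int := (5, 2)

def Spec_compute_receptive_field (residual_layers : Int) (dilation_cycle_length : Int) (out : List (String × Int)) : Prop := out = compute_receptive_field_alt residual_layers dilation_cycle_length
instance (residual_layers : Int) (dilation_cycle_length : Int) (out : List (String × Int)) : Decidable (Spec_compute_receptive_field residual_layers dilation_cycle_length out) := by unfold Spec_compute_receptive_field; infer_instance

-- ===== CLAIM (what is proved, stated in full; the proofs are below) =====
def Claim_equal_compute_receptive_field : Prop := ∀ (residual_layers : Int) (dilation_cycle_length : Int), Dom_compute_receptive_field residual_layers dilation_cycle_length → Pre_compute_receptive_field residual_layers dilation_cycle_length → Spec_compute_receptive_field residual_layers dilation_cycle_length (compute_receptive_field residual_layers dilation_cycle_length)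

-- ===== LEMMAS AND PROOFS =====

-- The cycle sum Σ_{i<m} 2^(i % Ln) in ℤ.
def cycleSum (m Ln : Nat) : Int := ((List.range m).map (fun i => (2:Int) ^ (i % Ln))).sum

lemma cycleSum_succ (m Ln : Nat) :
    cycleSum (m + 1) Ln = cycleSum m Ln + (2:Int) ^ (m % Ln) := by
  simp [cycleSum, List.range_succ]

lemma cycleSum_closed (Ln : Nat) (hL : 1 ≤ Ln) (m : Nat) :
    cycleSum m Ln = (m / Ln : Nat) * ((2:Int) ^ Ln - 1) + ((2:Int) ^ (m % Ln) - 1) := by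
  induction m with
  | zero => simp [cycleSum]
  | succ m ih =>
    rw [cycleSum_succ, ih]
    have hr : m % Ln < Ln := Nat.mod_lt _ (by omega)
    rcases Nat.lt_or_ge (m % Ln + 1) Ln with h | h
    · -- stay inside the cycle
      have hm' : (m + 1) % Ln = m % Ln + 1 := by
        rw [Nat.add_mod, Nat.mod_eq_of_lt (show 1 < Ln by omega), Nat.mod_eq_of_lt h]
      have h1 : Ln * (m / Ln) + m % Ln = m := Nat.div_add_mod m Ln
      have h1' : Ln * ((m + 1) / Ln) + (m + 1) % Ln = m + 1 := Nat.div_add_mod (m + 1) Ln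
      have hq : (m + 1) / Ln = m / Ln :=
        Nat.eq_of_mul_eq_mul_left (show 0 < Ln by omega) (by omega)
      rw [hq, hm', pow_succ]
      ring
    · -- wrap around: m % Ln + 1 = Ln
      have hrl : m % Ln + 1 = Ln := by omega
      have h1 : Ln * (m / Ln) + m % Ln = m := Nat.div_add_mod m Ln
      have h2 : m + 1 = Ln * (m / Ln + 1) := by rw [Nat.mul_add, Nat.mul_one]; omega
      have hq : (m + 1) / Ln = m / Ln + 1 := by
        rw [h2, Nat.mul_div_cancel_left _ (show 0 < Ln by omega)]
      have hm0 : (m + 1) % Ln = 0 := by rw [h2]; exact Nat.mul_mod_right _ _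
      have hpow : (2:Int) ^ Ln = 2 ^ (m % Ln) * 2 := by rw [← pow_succ, hrl]
      rw [hq, hm0, hpow, Nat.cast_add, Nat.cast_one]
      ring

-- A's fold evaluated in closed state form, for m layers.
lemma foldA (L : Int) (hL : 1 ≤ L) (m : Nat) :
    (PySem.List.pyRange 0 (m : Int) 1).foldl
      (fun (st : Int × Int × Int) i =>
        let dilation : Int := 2 ^ (PySem.Int.mod i L).toNat
        (st.1 + 2 * (3 - 1) * dilation, st.2.1 + 2 * (3 - 1), st.2.2 + 2 * (3 - 1)))
      (1, 1, 1)
    = (1 + 4 * cycleSum m L.toNat, 1 + 4 * (m : Int), 1 + 4 * (m : Int)) := by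
  induction m with
  | zero => simp [PySem.List.pyRange_one_eq_nil (by omega : (0:Int) ≤ 0), cycleSum]
  | succ m ih =>
    have hcast : ((m + 1 : Nat) : Int) = (m : Int) + 1 := by push_cast; ring
    rw [hcast, PySem.List.pyRange_one_succ_right (by positivity), List.foldl_append, ih]
    have hLc : L = ((L.toNat : Nat) : Int) := (Int.toNat_of_nonneg (by omega)).symm
    have hmod : (PySem.Int.mod (m : Int) L).toNat = m % L.toNat := by
      have h := PySem.Int.mod_natCast m L.toNat
      rw [← hLc] at h
      rw [h, Int.toNat_natCast]
    simp only [List.foldl, hmod, cycleSum_succ]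
    refine Prod.ext ?_ (Prod.ext ?_ ?_) <;> simp <;> ring

-- ===== VERDICT (by name: the statement is the Claim_ definition above) =====
theorem compute_receptive_field_spec : Claim_equal_compute_receptive_field := by
  intro n L _ hPre
  unfold Spec_compute_receptive_field compute_receptive_field compute_receptive_field_alt
  rcases le_or_gt n 0 with hn | hn
  · rw [PySem.List.pyRange_one_eq_nil hn]
    simp [if_neg (by omega : ¬ n > 0)]
  · have hL : 1 ≤ L := by
      rcases hPre with h | h
      · omega
      · exact h
    have hnc : n = ((n.toNat : Nat) : Int) := (Int.toNat_of_nonneg (by omega)).symm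
    have hLc : L = ((L.toNat : Nat) : Int) := (Int.toNat_of_nonneg (by omega)).symm
    rw [hnc, foldA L hL n.toNat]
    simp only [if_pos (show ((n.toNat : Nat) : Int) > 0 by omega),
      if_neg (show ¬ ((n.toNat : Nat) : Int) = 0 by omega)]
    rw [hLc, PySem.Int.floordiv_natCast, PySem.Int.mod_natCast]
    simp only [Int.toNat_natCast]
    rw [cycleSum_closed L.toNat (by omega) n.toNat]
    by_cases hq : ((n.toNat / L.toNat : Nat) : Int) = 0
    · simp [hq]
    · simp only [if_neg hq]
      ring_nf
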